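-- pv_equiv track=rewrite | github.com/baicai-1145/GPT-SoVITS-ANE | GPT_SoVITS/TTS_infer_pack/pause_splitter.py | _match_left_suffix
-- ===== SOURCE A (Python) =====
-- def _match_left_suffix(text: str, split_index: int, keywords: set[str]) -> str | None:
--     if not keywords:
--         return None
--     left_text = text[:split_index]
--     for keyword in sorted(keywords, key=len, reverse=True):
--         if left_text.endswith(keyword):
--             return keyword
--     return None
-- ===== SOURCE B (Python) =====
-- def _match_left_suffix(text: str, split_index: int, keywords: set[str]) -> str | None:
--     # Different strategy: instead of sorting all keywords and scanning with endswith,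
--     # sort only the distinct keyword lengths descending and probe the suffix of each
--     # length by set membership; the first hit is the longest matching keyword.
--     left = text[:split_index]
--     n = len(left)
--     for L in sorted({len(k) for k in keywords}, reverse=True):
--         if L <= n:
--             suf = left[n - L:]
--             if suf in keywords:
--                 return suf
--     return None
-- ===== Notes on version B (the rewrite author's own statement) =====
-- stated objective: alternative
-- what changed: Instead of sorting all keywords by length and scanning them with endswith, B sorts only the distinct keyword lengths descending and probes the suffix of each length by set membership, returning the first hit.
import Mathlib
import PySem

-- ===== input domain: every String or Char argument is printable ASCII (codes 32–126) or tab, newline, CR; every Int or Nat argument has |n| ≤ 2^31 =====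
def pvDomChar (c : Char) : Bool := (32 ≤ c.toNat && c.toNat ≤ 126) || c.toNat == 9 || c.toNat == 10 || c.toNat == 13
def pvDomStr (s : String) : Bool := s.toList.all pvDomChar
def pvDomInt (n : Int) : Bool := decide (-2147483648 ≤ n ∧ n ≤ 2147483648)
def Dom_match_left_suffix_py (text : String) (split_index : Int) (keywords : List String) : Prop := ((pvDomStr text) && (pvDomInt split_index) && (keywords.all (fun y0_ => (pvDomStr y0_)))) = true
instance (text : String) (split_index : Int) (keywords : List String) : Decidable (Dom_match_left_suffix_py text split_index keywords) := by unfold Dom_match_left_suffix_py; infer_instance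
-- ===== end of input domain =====

-- B replaces "sort all keywords by length, scan with endswith" by "sort the distinct keyword
-- lengths descending, probe the suffix of each length by membership" (objective: alternative).


-- ===== PORT A =====
-- the 'for keyword in sorted(keywords, key=len, reverse=True): if left_text.endswith(keyword): return keyword' loop
def matchACore (left : String) : List String → Option String
  | [] => none
  | k :: rest => if PySem.Str.endswith left k then some k else matchACore left rest

def match_left_suffix_py (text : String) (split_index : Int) (keywords : List String) : Option String :=
  if keywords = [] then none
  else
    let left_text := PySem.Str.slice text none (some split_index)
    matchACore left_text (PySem.List.sorted keywords (fun k => PySem.Str.len k) true)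

-- ===== PORT B =====
-- the 'for L in sorted({len(k) for k in keywords}, reverse=True): …' loop of Source B
def matchBCore (left : String) (n : Int) (keywords : List String) : List Int → Option String
  | [] => none
  | L :: rest =>
    if L ≤ n then
      let suf := PySem.Str.slice left (some (n - L)) none
      if suf ∈ keywords then some suf else matchBCore left n keywords rest
    else matchBCore left n keywords rest

def match_left_suffix_py_alt (text : String) (split_index : Int) (keywords : List String) : Option String :=
  let left := PySem.Str.slice text none (some split_index)
  let n := PySem.Str.len left
  matchBCore left n keywords
    (PySem.List.sorted (PySem.Set.ofList (keywords.map (fun k => PySem.Str.len k))) (fun x => x) true)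

-- ===== PRECONDITION & SPEC =====
def Spec_match_left_suffix_py (text : String) (split_index : Int) (keywords : List String) (out : Option String) : Prop := out = match_left_suffix_py_alt text split_index keywords
instance (text : String) (split_index : Int) (keywords : List String) (out : Option String) : Decidable (Spec_match_left_suffix_py text split_index keywords out) := by unfold Spec_match_left_suffix_py; infer_instance

-- ===== CLAIM (what is proved, stated in full; the proofs are below) =====
def Claim_equal_match_left_suffix_py : Prop := ∀ (text : String) (split_index : Int) (keywords : List String), Dom_match_left_suffix_py text split_index keywords → Spec_match_left_suffix_py text split_index keywords (match_left_suffix_py text split_index keywords)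

-- ===== LEMMAS AND PROOFS =====

-- the suffix of `left` of length L (as B computes it), and B's loop test
def sufAt (left : String) (n L : Int) : String := PySem.Str.slice left (some (n - L)) none
def qB (left : String) (n : Int) (keywords : List String) (L : Int) : Bool :=
  decide (L ≤ n) && decide (sufAt left n L ∈ keywords)

-- "k is a longest keyword that is a suffix of cs"
def IsBest (cs : List Char) (keywords : List String) (k : String) : Prop :=
  k ∈ keywords ∧ k.toList <:+ cs ∧
    ∀ k' ∈ keywords, k'.toList <:+ cs → k'.toList.length ≤ k.toList.length

theorem matchACore_eq_find? (left : String) (l : List String) :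
    matchACore left l = l.find? (fun k => PySem.Str.endswith left k) := by
  induction l with
  | nil => rfl
  | cons k rest ih => simp only [matchACore, List.find?]; split_ifs with h <;> simp_all

theorem matchBCore_eq_find? (left : String) (n : Int) (keywords : List String) (l : List Int) :
    matchBCore left n keywords l = (l.find? (qB left n keywords)).map (sufAt left n) := by
  induction l with
  | nil => rfl
  | cons L rest ih =>
    by_cases h1 : L ≤ n
    · by_cases h2 : PySem.Str.slice left (some (n - L)) none ∈ keywords
      · simp [matchBCore, List.find?, qB, sufAt, h1, h2]
      · simp [matchBCore, List.find?, qB, sufAt, h1, h2, ih]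
    · simp [matchBCore, List.find?, qB, sufAt, h1, ih]

theorem endswith_iff' (s p : String) : PySem.Str.endswith s p = true ↔ p.toList <:+ s.toList := by
  simp [PySem.Chars.endswith_iff]

theorem len_eq' (s : String) : PySem.Str.len s = (s.toList.length : Int) := by
  simp only [PySem.Str.len, String.length_toList]

theorem toList_sufAt (left : String) (n L : Int) (h : 0 ≤ n - L) :
    (sufAt left n L).toList = left.toList.drop (n - L).toNat := by
  simp only [sufAt, PySem.Str.slice, PySem.Chars.slice_eq_listSlice, String.toList_ofList]
  exact PySem.List.slice_from _ h

theorem sufAt_eq_of_suffix (left : String) (n : Int) (k : String)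
    (hn : n = (left.toList.length : Int)) (h : k.toList <:+ left.toList) :
    sufAt left n (k.toList.length : Int) = k := by
  have hle : k.toList.length ≤ left.toList.length := h.length_le
  apply String.toList_inj.mp
  rw [toList_sufAt left n _ (by omega)]
  rw [show (n - (k.toList.length : Int)).toNat = left.toList.length - k.toList.length by omega]
  exact (List.suffix_iff_eq_drop.mp h).symm

theorem IsBest_unique (cs : List Char) (keywords : List String) (k₁ k₂ : String)
    (h₁ : IsBest cs keywords k₁) (h₂ : IsBest cs keywords k₂) : k₁ = k₂ := by
  obtain ⟨m₁, s₁, b₁⟩ := h₁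
  obtain ⟨m₂, s₂, b₂⟩ := h₂
  have hlen : k₁.toList.length = k₂.toList.length :=
    le_antisymm (b₂ k₁ m₁ s₁) (b₁ k₂ m₂ s₂)
  apply String.toList_inj.mp
  rw [List.suffix_iff_eq_drop.mp s₁, List.suffix_iff_eq_drop.mp s₂, hlen]

theorem A_some (left : String) (keywords : List String) (k : String)
    (h : matchACore left (PySem.List.sorted keywords (fun k => PySem.Str.len k) true) = some k) :
    IsBest left.toList keywords k := by
  rw [matchACore_eq_find?] at h
  obtain ⟨hp, as, bs, heq, hbefore⟩ := List.find?_eq_some_iff_append.mp h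
  have hmem : k ∈ keywords := by
    rw [← PySem.List.mem_sorted keywords (fun k => PySem.Str.len k) true, heq]
    simp
  refine ⟨hmem, (endswith_iff' left k).mp hp, ?_⟩
  intro k' hk' hsuf
  have hk'mem : k' ∈ as ++ k :: bs := by
    rw [← heq, PySem.List.mem_sorted]; exact hk'
  rcases List.mem_append.mp hk'mem with hin | hin
  · exact absurd ((endswith_iff' left k').mpr hsuf) (by simpa using hbefore k' hin)
  · rcases List.mem_cons.mp hin with rfl | hin
    · exact le_refl _
    · have hpw := PySem.List.sorted_pairwise_rev keywords (fun k => PySem.Str.len k)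
      rw [heq] at hpw
      have := (List.pairwise_cons.mp (List.pairwise_append.mp hpw).2.1).1 k' hin
      rw [len_eq', len_eq'] at this
      exact_mod_cast this

theorem A_none (left : String) (keywords : List String)
    (h : matchACore left (PySem.List.sorted keywords (fun k => PySem.Str.len k) true) = none) :
    ∀ k ∈ keywords, ¬ k.toList <:+ left.toList := by
  rw [matchACore_eq_find?] at h
  intro k hk hsuf
  exact (List.find?_eq_none.mp h k
    ((PySem.List.mem_sorted keywords (fun k => PySem.Str.len k) true k).mpr hk))
    ((endswith_iff' left k).mpr hsuf)

-- B's sorted length list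
def lensOf (keywords : List String) : List Int :=
  PySem.List.sorted (PySem.Set.ofList (keywords.map (fun k => PySem.Str.len k))) (fun x => x) true

theorem mem_lensOf (keywords : List String) (L : Int) :
    L ∈ lensOf keywords ↔ ∃ k ∈ keywords, (k.toList.length : Int) = L := by
  simp only [lensOf, PySem.List.mem_sorted, PySem.Set.mem_ofList, List.mem_map, len_eq']

theorem qB_of_suffix (left : String) (n : Int) (keywords : List String) (k : String)
    (hn : n = (left.toList.length : Int)) (hk : k ∈ keywords) (hsuf : k.toList <:+ left.toList) :
    qB left n keywords (k.toList.length : Int) = true := by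
  have hle : k.toList.length ≤ left.toList.length := hsuf.length_le
  simp only [qB, Bool.and_eq_true, decide_eq_true_eq]
  refine ⟨by omega, ?_⟩
  rw [sufAt_eq_of_suffix left n k hn hsuf]; exact hk

theorem B_some (left : String) (n : Int) (keywords : List String) (s : String)
    (hn : n = (left.toList.length : Int))
    (h : matchBCore left n keywords (lensOf keywords) = some s) :
    IsBest left.toList keywords s := by
  rw [matchBCore_eq_find?] at h
  obtain ⟨L, hfind, rfl⟩ := Option.map_eq_some_iff.mp h
  obtain ⟨hq, as, bs, heq, hbefore⟩ := List.find?_eq_some_iff_append.mp hfind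
  obtain ⟨hLn, hmem⟩ : L ≤ n ∧ sufAt left n L ∈ keywords := by
    simpa [qB] using hq
  have hL0 : 0 ≤ L := by
    have hmemL : L ∈ lensOf keywords := by rw [heq]; simp
    obtain ⟨k0, _, hk0⟩ := (mem_lensOf keywords L).mp hmemL
    omega
  have htl := toList_sufAt left n L (by omega)
  have hsuf : (sufAt left n L).toList <:+ left.toList := by
    rw [htl]; exact List.drop_suffix _ _
  have hlenL : ((sufAt left n L).toList.length : Int) = L := by
    rw [htl, List.length_drop]; omega
  refine ⟨hmem, hsuf, ?_⟩
  intro k' hk' hsuf'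
  have hq' := qB_of_suffix left n keywords k' hn hk' hsuf'
  have hmem' : (k'.toList.length : Int) ∈ as ++ L :: bs := by
    rw [← heq, mem_lensOf]; exact ⟨k', hk', rfl⟩
  have hgoal : (k'.toList.length : Int) ≤ L := by
    rcases List.mem_append.mp hmem' with hin | hin
    · exact absurd hq' (by simpa using hbefore _ hin)
    · rcases List.mem_cons.mp hin with he | hin
      · omega
      · have hpw := PySem.List.sorted_pairwise_rev
          (PySem.Set.ofList (keywords.map (fun k => PySem.Str.len k))) (fun x : Int => x)
        rw [show PySem.List.sorted (PySem.Set.ofList (keywords.map (fun k => PySem.Str.len k))) (fun x : Int => x) true = as ++ L :: bs from heq] at hpw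
        exact (List.pairwise_cons.mp (List.pairwise_append.mp hpw).2.1).1 _ hin
  omega

theorem B_none (left : String) (n : Int) (keywords : List String)
    (hn : n = (left.toList.length : Int))
    (h : matchBCore left n keywords (lensOf keywords) = none) :
    ∀ k ∈ keywords, ¬ k.toList <:+ left.toList := by
  rw [matchBCore_eq_find?] at h
  intro k hk hsuf
  have hL : (k.toList.length : Int) ∈ lensOf keywords := (mem_lensOf keywords _).mpr ⟨k, hk, rfl⟩
  have := List.find?_eq_none.mp (by simpa using h) _ hL
  exact this (qB_of_suffix left n keywords k hn hk hsuf)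

-- ===== VERDICT (by name: the statement is the Claim_ definition above) =====
theorem match_left_suffix_py_spec : Claim_equal_match_left_suffix_py := by
  intro text split_index keywords _
  unfold Spec_match_left_suffix_py match_left_suffix_py match_left_suffix_py_alt
  by_cases hkw : keywords = []
  · subst hkw; rfl
  · rw [if_neg hkw]
    set left := PySem.Str.slice text none (some split_index) with hleft
    have hn : PySem.Str.len left = (left.toList.length : Int) := len_eq' left
    show matchACore left (PySem.List.sorted keywords (fun k => PySem.Str.len k) true)
        = matchBCore left (PySem.Str.len left) keywords (lensOf keywords)
    cases hA : matchACore left (PySem.List.sorted keywords (fun k => PySem.Str.len k) true) with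
    | none =>
      cases hB : matchBCore left (PySem.Str.len left) keywords (lensOf keywords) with
      | none => rfl
      | some s =>
        obtain ⟨hsmem, hssuf, _⟩ := B_some left _ keywords s hn hB
        exact absurd hssuf (A_none left keywords hA s hsmem)
    | some k =>
      cases hB : matchBCore left (PySem.Str.len left) keywords (lensOf keywords) with
      | none =>
        obtain ⟨hkmem, hksuf, _⟩ := A_some left keywords k hA
        exact absurd hksuf (B_none left _ keywords hn hB k hkmem)
      | some s =>
        exact congrArg some (IsBest_unique left.toList keywords k s
          (A_some left keywords k hA) (B_some left _ keywords s hn hB))
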